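-- pv_equiv track=rewrite | github.com/MaxPhilb/epicArduino | OutilsTest/testDigIN.py | createBoolString
-- ===== SOURCE A (Python) =====
-- def createBoolString(id,direction):
--     str=""
--     for i in range(192):
--         if direction:
--             if i<=id:
--                 str+="1,"
--             else:
--                 str+="0,"
--         else:
--             if i<=id:
--                 str+="0,"
--             else:
--                 str+="1,"
--     str=str[0:len(str)-1]
--     return str
-- ===== SOURCE B (Python) =====
-- def createBoolString(id, direction):
--     cnt = min(max(id + 1, 0), 192)
--     ones, zeros = ("1", "0") if direction else ("0", "1")
--     return ",".join([ones] * cnt + [zeros] * (192 - cnt))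
-- ===== Notes on version B (the rewrite author's own statement) =====
-- stated objective: simpler
-- what changed: Replaces the 192-iteration per-element branch loop and trailing-comma strip by a closed-form count cnt = clamp(id+1, 0, 192) and a single ','.join of two replicated blocks.
import Mathlib
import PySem

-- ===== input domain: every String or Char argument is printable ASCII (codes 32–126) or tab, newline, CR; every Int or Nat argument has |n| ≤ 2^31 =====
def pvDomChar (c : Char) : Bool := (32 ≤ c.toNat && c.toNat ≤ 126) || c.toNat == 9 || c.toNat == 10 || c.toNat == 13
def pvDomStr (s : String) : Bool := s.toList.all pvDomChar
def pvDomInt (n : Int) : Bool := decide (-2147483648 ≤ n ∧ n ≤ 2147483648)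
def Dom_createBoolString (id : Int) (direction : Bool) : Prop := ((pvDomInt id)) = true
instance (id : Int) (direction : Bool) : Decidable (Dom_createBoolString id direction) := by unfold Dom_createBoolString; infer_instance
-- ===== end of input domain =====

-- B replaces A's 192-step branch-per-element loop (and trailing-comma strip) by a
-- closed-form count clamp(id+1,0,192) and one join of two replicated blocks (objective: simpler).

-- ===== PORT A =====
def createBoolString (id : Int) (direction : Bool) : String :=
  let s := (PySem.List.pyRange 0 192 1).foldl (fun str i =>
    if direction then
      (if i ≤ id then str ++ "1," else str ++ "0,")
    else
      (if i ≤ id then str ++ "0," else str ++ "1,")) ""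
  PySem.Str.slice s (some 0) (some (PySem.Str.len s - 1))

-- ===== PORT B =====
def createBoolString_alt (id : Int) (direction : Bool) : String :=
  let cnt := min (max (id + 1) 0) 192
  let ones := if direction then "1" else "0"
  let zeros := if direction then "0" else "1"
  PySem.Str.join "," (List.replicate cnt.toNat ones ++ List.replicate (192 - cnt).toNat zeros)

-- ===== PRECONDITION & SPEC =====
def Spec_createBoolString (id : Int) (direction : Bool) (out : String) : Prop := out = createBoolString_alt id direction
instance (id : Int) (direction : Bool) (out : String) : Decidable (Spec_createBoolString id direction out) := by unfold Spec_createBoolString; infer_instance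

-- ===== CLAIM (what is proved, stated in full; the proofs are below) =====
def Claim_equal_createBoolString : Prop := ∀ (id : Int) (direction : Bool), Dom_createBoolString id direction → Spec_createBoolString id direction (createBoolString id direction)

-- ===== LEMMAS AND PROOFS =====

-- A's append-loop, on char lists: a flatten of the per-element blocks
theorem pv_fold {α : Type} (p : α → Prop) [DecidablePred p] (u v : String) :
    ∀ (l : List α) (s0 : String),
      (List.foldl (fun s i => if p i then s ++ u else s ++ v) s0 l).toList =
        s0.toList ++ (l.map (fun i => if p i then u.toList else v.toList)).flatten := by
  intro l
  induction l with
  | nil => intro s0; simp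
  | cons x xs ih =>
      intro s0
      by_cases h : p x <;> simp [h, ih, List.append_assoc]

-- the per-element choices over range n collapse to two replicated blocks
theorem pv_map (id : Int) {α : Type} (u v : α) :
    ∀ n : Nat, (List.range n).map (fun (k : Nat) => if (k : Int) ≤ id then u else v) =
      List.replicate (min (max (id + 1) 0) (n : Int)).toNat u ++
        List.replicate (n - (min (max (id + 1) 0) (n : Int)).toNat) v := by
  intro n
  induction n with
  | zero => simp
  | succ n ih =>
      rw [List.range_succ, List.map_append, ih]
      by_cases h : (n : Int) ≤ id
      · have h1 : (min (max (id + 1) 0) ((n : Nat) : Int)).toNat = n := by omega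
        have h2 : (min (max (id + 1) 0) (((n + 1 : Nat)) : Int)).toNat = n + 1 := by
          push_cast; omega
        simp [h, h1, h2, List.replicate_succ']
      · have h1 : (min (max (id + 1) 0) ((n : Int) + 1)).toNat =
            (min (max (id + 1) 0) ((n : Nat) : Int)).toNat := by omega
        have h2 : (n + 1) - (min (max (id + 1) 0) ((n : Nat) : Int)).toNat =
            ((n - (min (max (id + 1) 0) ((n : Nat) : Int)).toNat) + 1) := by omega
        push_cast
        simp [h, h1, h2, List.replicate_succ', List.append_assoc]

theorem pv_len (u : Char) (bs : List Char) :
    ((bs.map (fun b => [b, u])).flatten).length = 2 * bs.length := by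
  induction bs with
  | nil => simp
  | cons b rest ih => simp [ih]; omega

-- dropping the final separator of the block flatten gives the separator-join
theorem pv_take (sep : Char) :
    ∀ bs : List Char, bs ≠ [] →
      ((bs.map (fun b => [b, sep])).flatten).take (2 * bs.length - 1) =
        PySem.Chars.join [sep] (bs.map (fun b => [b])) := by
  intro bs
  induction bs with
  | nil => intro h; exact absurd rfl h
  | cons b rest ih =>
      intro _
      cases rest with
      | nil => simp [PySem.Chars.join_singleton]
      | cons c cs =>
          have hne : (c :: cs) ≠ [] := by simp
          have hlen : 2 * ((b :: c :: cs).length) - 1 = ((2 * ((c :: cs).length) - 1) + 1) + 1 := by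
            simp; omega
          rw [hlen]
          simp only [List.map_cons, List.flatten_cons]
          rw [PySem.Chars.join_cons_cons]
          simp only [List.cons_append, List.nil_append, List.take_succ_cons]
          have hsh : (c :: sep :: (List.map (fun b => [b, sep]) cs).flatten) =
              (List.map (fun b => [b, sep]) (c :: cs)).flatten := rfl
          rw [hsh, ih hne]
          rfl

-- both ports, for either direction, reduce to the same char-list identity
theorem pv_main (id : Int) (one zero : Char) (u v o z : String)
    (hu : u.toList = [one, ',']) (hv : v.toList = [zero, ','])
    (ho : o.toList = [one]) (hz : z.toList = [zero]) :
    PySem.Str.slice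
      ((PySem.List.pyRange 0 192 1).foldl (fun s i => if i ≤ id then s ++ u else s ++ v) "")
      (some 0)
      (some (PySem.Str.len ((PySem.List.pyRange 0 192 1).foldl (fun s i => if i ≤ id then s ++ u else s ++ v) "") - 1)) =
    PySem.Str.join "," (List.replicate (min (max (id + 1) 0) 192).toNat o ++
      List.replicate (192 - min (max (id + 1) 0) 192).toNat z) := by
  apply String.toList_inj.mp
  -- name the loop result and compute its char list
  set s : String := (PySem.List.pyRange 0 192 1).foldl (fun s i => if i ≤ id then s ++ u else s ++ v) "" with hsdef
  set c : Nat := (min (max (id + 1) 0) 192).toNat with hc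
  set bs : List Char := List.replicate c one ++ List.replicate (192 - c) zero with hbs
  have hrange : PySem.List.pyRange 0 192 1 = (List.range 192).map (fun (k : Nat) => (k : Int)) := by
    rw [PySem.List.pyRange_one]; norm_num; rfl
  have hs : s.toList = (bs.map (fun b => [b, ','])).flatten := by
    rw [hsdef, hrange, List.foldl_map]
    rw [pv_fold (fun (k : Nat) => (k : Int) ≤ id) u v]
    rw [hu, hv, pv_map id ([one, ','] : List Char) ([zero, ','] : List Char) 192]
    have h192 : ((192 : Nat) : Int) = (192 : Int) := by norm_num
    rw [h192]
    simp [hbs, List.map_replicate]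
    rw [hc]
  have hclen : c ≤ 192 := by omega
  have hlenbs : bs.length = 192 := by simp [hbs]; omega
  have hne : bs ≠ [] := by intro h; rw [h] at hlenbs; simp at hlenbs
  have hslen : s.toList.length = 384 := by rw [hs, pv_len, hlenbs]
  -- left side: the slice drops the final comma
  have hL : (PySem.Str.slice s (some 0) (some (PySem.Str.len s - 1))).toList =
      s.toList.take 383 := by
    have hlen' : PySem.Str.len s - 1 = (383 : Int) := by
      simp [hslen]
    rw [hlen']
    simp [PySem.List.slice_to]
  rw [hL, hs]
  have h383 : (383 : Nat) = 2 * bs.length - 1 := by rw [hlenbs]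
  rw [h383, pv_take ',' bs hne]
  -- right side: the join of the two replicated blocks
  have hm : (192 - min (max (id + 1) 0) 192).toNat = 192 - c := by omega
  rw [hm]
  simp [PySem.Str.toList_join, List.map_replicate, ho, hz, hbs]

-- ===== VERDICT (by name: the statement is the Claim_ definition above) =====
theorem createBoolString_spec : Claim_equal_createBoolString := by
  intro id d _
  unfold Spec_createBoolString createBoolString createBoolString_alt
  cases d
  · simp only [Bool.false_eq_true, if_false]
    exact pv_main id '0' '1' "0," "1," "0" "1" (by decide) (by decide) (by decide) (by decide)
  · simp only [if_true]
    exact pv_main id '1' '0' "1," "0," "1" "0" (by decide) (by decide) (by decide) (by decide)
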